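-- pv_equiv track=rewrite | github.com/RazerM/parver | src/parver/_version.py | is_strict_local_alpha
-- ===== SOURCE A (Python) =====
-- def is_strict_local_alpha(s: str) -> bool:
--     """Check if a local part is a valid alpha segment in strict mode.
--
--     Pattern: [0-9]*[a-z][a-z0-9]*
--     Must contain at least one lowercase letter.
--     """
--     if not s:
--         return False
--     # Must be ASCII alphanumeric
--     if not s.isascii() or not s.isalnum():
--         return False
--     # Must contain at least one lowercase letter
--     if not any(c.islower() for c in s):
--         return False
--     # Find the first letter; the lowercase-letter check above guarantees one exists.
--     first_letter_idx = next(i for i, c in enumerate(s) if c.isalpha())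
--     # First letter and all after must be lowercase alphanumeric
--     for c in s[first_letter_idx:]:
--         if not (c.islower() or c.isdigit()):
--             return False
--     return True
-- ===== SOURCE B (Python) =====
-- def is_strict_local_alpha(s: str) -> bool:
--     """One-pass DFA for [0-9]*[a-z][a-z0-9]*: any string of lowercase letters
--     and digits containing at least one letter (before the first letter only
--     digits can occur, which over this alphabet is automatic)."""
--     seen_letter = False
--     for c in s:
--         if 'a' <= c <= 'z':
--             seen_letter = True
--         elif not ('0' <= c <= '9'):
--             return False
--     return seen_letter
-- ===== Notes on version B (the rewrite author's own statement) =====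
-- stated objective: simpler
-- what changed: Replaced A's multi-pass scan (isascii+isalnum check, any-islower pass, first-letter search, suffix scan) with a single left-to-right pass tracking one flag (letter seen), rejecting on any char outside [a-z0-9].
import Mathlib
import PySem

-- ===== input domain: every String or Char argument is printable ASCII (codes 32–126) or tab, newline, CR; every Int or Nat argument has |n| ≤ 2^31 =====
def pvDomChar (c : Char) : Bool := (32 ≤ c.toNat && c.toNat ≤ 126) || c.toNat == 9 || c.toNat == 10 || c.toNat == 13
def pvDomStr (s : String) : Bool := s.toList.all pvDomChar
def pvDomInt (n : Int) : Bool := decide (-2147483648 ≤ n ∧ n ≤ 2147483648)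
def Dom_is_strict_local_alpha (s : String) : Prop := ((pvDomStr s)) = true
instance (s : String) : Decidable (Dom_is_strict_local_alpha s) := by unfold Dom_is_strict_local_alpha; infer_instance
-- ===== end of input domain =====

-- B replaces A's multi-pass scan with a single one-pass state machine over the string (objective: simpler).

-- ===== PORT A =====
def is_strict_local_alpha (s : String) : Bool :=
  let cs := s.toList
  if cs.isEmpty then false                              -- if not s
  -- s.isascii() ported by hand: exact — True iff every code point is < 128
  else if !(cs.all fun c => c.toNat ≤ 127) || !(PySem.Chars.strIsalnum cs) then false
  else if !(cs.any PySem.Chars.islower) then false      -- any(c.islower() for c in s)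
  else
    -- next(i for i, c in enumerate(s) if c.isalpha()); guaranteed to exist by the any-check above
    let firstLetterIdx := cs.findIdx PySem.Chars.isalpha
    -- for c in s[first_letter_idx:]: if not (c.islower() or c.isdigit()): return False / return True
    (PySem.List.slice cs (some (firstLetterIdx : Int)) none).all
      (fun c => PySem.Chars.islower c || PySem.Chars.isdigit c)

-- ===== PORT B =====
def pvAltLoop : List Char → Bool → Bool
  | [], seen => seen
  | c :: cs, seen =>
    if 'a' ≤ c ∧ c ≤ 'z' then pvAltLoop cs true
    else if '0' ≤ c ∧ c ≤ '9' then pvAltLoop cs seen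
    else false

def is_strict_local_alpha_alt (s : String) : Bool := pvAltLoop s.toList false

-- ===== PRECONDITION & SPEC =====
def Spec_is_strict_local_alpha (s : String) (out : Bool) : Prop := out = is_strict_local_alpha_alt s
instance (s : String) (out : Bool) : Decidable (Spec_is_strict_local_alpha s out) := by unfold Spec_is_strict_local_alpha; infer_instance

-- ===== CLAIM (what is proved, stated in full; the proofs are below) =====
def Claim_equal_is_strict_local_alpha : Prop := ∀ (s : String), Dom_is_strict_local_alpha s → Spec_is_strict_local_alpha s (is_strict_local_alpha s)

-- ===== LEMMAS AND PROOFS =====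

-- B's loop computes: all chars in [a-z0-9], and a letter was (or had been) seen
theorem pvAltLoop_eq (cs : List Char) (seen : Bool) :
    pvAltLoop cs seen =
      (cs.all (fun c => PySem.Chars.islower c || PySem.Chars.isdigit c) &&
        (seen || cs.any PySem.Chars.islower)) := by
  induction cs generalizing seen with
  | nil => simp [pvAltLoop]
  | cons c cs ih =>
    simp only [pvAltLoop, List.all_cons, List.any_cons]
    by_cases h1 : 'a' ≤ c ∧ c ≤ 'z'
    · have hl : PySem.Chars.islower c = true := by
        simp [PySem.Chars.islower, h1.1, h1.2]
      rw [if_pos h1, ih, hl]; simp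
    · have hl : PySem.Chars.islower c = false := by
        simp only [PySem.Chars.islower, Bool.and_eq_true_iff, decide_eq_true_eq,
          Bool.eq_false_iff, ne_eq]
        exact fun h => h1 ⟨h.1, h.2⟩
      rw [if_neg h1]
      by_cases h2 : '0' ≤ c ∧ c ≤ '9'
      · have hd : PySem.Chars.isdigit c = true := by
          simp [PySem.Chars.isdigit, h2.1, h2.2]
        rw [if_pos h2, ih, hl, hd]; simp
      · have hd : PySem.Chars.isdigit c = false := by
          simp only [PySem.Chars.isdigit, Bool.and_eq_true_iff, decide_eq_true_eq,
            Bool.eq_false_iff, ne_eq]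
          exact fun h => h2 ⟨h.1, h.2⟩
        rw [if_neg h2, hl, hd]; simp

-- a char in [a-z] or [0-9] is alphanumeric
theorem good_isalnum (c : Char)
    (h : (PySem.Chars.islower c || PySem.Chars.isdigit c) = true) :
    PySem.Chars.isalnum c = true := by
  simp only [PySem.Chars.isalnum, PySem.Chars.isalpha] at *
  rcases Bool.or_eq_true_iff.mp h with h | h <;> simp [h]

-- alphanumeric and not a letter means digit
theorem alnum_not_alpha (c : Char)
    (h : PySem.Chars.isalnum c = true) (h2 : PySem.Chars.isalpha c = false) :
    PySem.Chars.isdigit c = true := by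
  simp only [PySem.Chars.isalnum] at h
  rcases Bool.or_eq_true_iff.mp h with h | h
  · rw [h] at h2; exact absurd h2 (by simp)
  · exact h

-- everything before the first index where p holds fails p
theorem take_findIdx_all_not {α : Type} (p : α → Bool) (cs : List α) :
    (cs.take (cs.findIdx p)).all (fun c => !p c) = true := by
  induction cs with
  | nil => simp
  | cons c cs ih =>
    by_cases h : p c
    · simp [List.findIdx_cons, h]
    · simp [List.findIdx_cons, h, ih]

theorem is_strict_local_alpha_spec : Claim_equal_is_strict_local_alpha := by
  intro s hDom
  unfold Spec_is_strict_local_alpha is_strict_local_alpha is_strict_local_alpha_alt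
  rw [pvAltLoop_eq]
  set cs := s.toList with hcs
  have hAscii : (cs.all fun c => c.toNat ≤ 127) = true := by
    rw [List.all_eq_true]
    intro c hc
    have h := (List.all_eq_true.mp hDom) c hc
    simp only [pvDomChar, Bool.or_eq_true, Bool.and_eq_true, decide_eq_true_eq,
      beq_iff_eq] at h
    simp only [decide_eq_true_eq]
    omega
  by_cases hnil : cs = []
  · simp [hnil]
  · have hne : cs.isEmpty = false := by simp [hnil]
    by_cases halnum : PySem.Chars.strIsalnum cs = true
    · have halnum' : ∀ c ∈ cs, PySem.Chars.isalnum c = true := by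
        simp only [PySem.Chars.strIsalnum, Bool.and_eq_true_iff] at halnum
        exact List.all_eq_true.mp halnum.2
      by_cases hlow : cs.any PySem.Chars.islower = true
      · -- the interesting case: A runs its final suffix loop
        have htake : (cs.take (cs.findIdx PySem.Chars.isalpha)).all
            (fun c => PySem.Chars.islower c || PySem.Chars.isdigit c) = true := by
          rw [List.all_eq_true]
          intro c hc
          have hnotalpha := List.all_eq_true.mp
            (take_findIdx_all_not PySem.Chars.isalpha cs) c hc
          have : PySem.Chars.isdigit c = true :=
            alnum_not_alpha c (halnum' c (List.mem_of_mem_take hc))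
              (by simpa using hnotalpha)
          simp [this]
        have hall : cs.all (fun c => PySem.Chars.islower c || PySem.Chars.isdigit c)
            = (cs.drop (cs.findIdx PySem.Chars.isalpha)).all
                (fun c => PySem.Chars.islower c || PySem.Chars.isdigit c) := by
          conv_lhs => rw [← List.take_append_drop (cs.findIdx PySem.Chars.isalpha) cs]
          rw [List.all_append, htake, Bool.true_and]
        simp [hne, hAscii, halnum, hlow, PySem.List.slice_from_natCast, hall]
      · have hlow' : cs.any PySem.Chars.islower = false := Bool.eq_false_iff.mpr hlow
        simp [hne, hAscii, halnum, hlow']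
    · have halnum'' : PySem.Chars.strIsalnum cs = false := Bool.eq_false_iff.mpr halnum
      have hgood : cs.all (fun c => PySem.Chars.islower c || PySem.Chars.isdigit c)
          = false := by
        rw [Bool.eq_false_iff]
        intro hall
        apply halnum
        simp only [PySem.Chars.strIsalnum, Bool.and_eq_true_iff]
        exact ⟨by simp [hnil], List.all_eq_true.mp (by exact hall) |> fun h =>
          List.all_eq_true.mpr (fun c hc => good_isalnum c (h c hc))⟩
      simp [hne, hAscii, halnum'', hgood]
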